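-- pv_equiv track=rewrite | github.com/leftos/vatsim_control_recs | airport_disambiguator.py | _get_first_occurring_entity
-- ===== SOURCE A (Python) =====
-- from typing import List, Tuple, Optional
--
-- def _get_first_occurring_entity(airport_name: str, persons: List[str], locations: List[str]) -> Optional[str]:
--     """
--     Determine which entity appears first in the airport name.
--     Prioritizes the first complete entity found.
--     """
--     if not persons and not locations:
--         return None
--
--     # Clean name for searching
--     clean_name = airport_name.lower()
--
--     # Find positions of all entities
--     entity_positions = []
--
--     for person in persons:
--         pos = clean_name.find(person.lower())
--         if pos != -1:
--             entity_positions.append((pos, person, "person"))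
--
--     for location in locations:
--         pos = clean_name.find(location.lower())
--         if pos != -1:
--             entity_positions.append((pos, location, "location"))
--
--     if not entity_positions:
--         return None
--
--     # Sort by position (first occurrence)
--     entity_positions.sort(key=lambda x: x[0])
--
--     # Return the first entity
--     return entity_positions[0][1]
-- ===== SOURCE B (Python) =====
-- from typing import List, Optional
--
--
-- def _get_first_occurring_entity(airport_name: str, persons: List[str], locations: List[str]) -> Optional[str]:
--     """Single min-scan: track the earliest-position entity, no list and no sort."""
--     clean_name = airport_name.lower()
--     best = None  # (position, entity); earliest position wins, earlier iteration wins ties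
--     for entity in persons + locations:
--         pos = clean_name.find(entity.lower())
--         if pos == -1:
--             continue
--         if best is None or pos < best[0]:
--             best = (pos, entity)
--     return None if best is None else best[1]
-- ===== Notes on version B (the rewrite author's own statement) =====
-- stated objective: simpler
-- what changed: Replaces building a tagged (pos, entity, kind) list and stable-sorting it with a single min-scan over persons+locations that keeps only the best (position, entity) pair, with strict '<' preserving the stable tie-break.
import Mathlib
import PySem

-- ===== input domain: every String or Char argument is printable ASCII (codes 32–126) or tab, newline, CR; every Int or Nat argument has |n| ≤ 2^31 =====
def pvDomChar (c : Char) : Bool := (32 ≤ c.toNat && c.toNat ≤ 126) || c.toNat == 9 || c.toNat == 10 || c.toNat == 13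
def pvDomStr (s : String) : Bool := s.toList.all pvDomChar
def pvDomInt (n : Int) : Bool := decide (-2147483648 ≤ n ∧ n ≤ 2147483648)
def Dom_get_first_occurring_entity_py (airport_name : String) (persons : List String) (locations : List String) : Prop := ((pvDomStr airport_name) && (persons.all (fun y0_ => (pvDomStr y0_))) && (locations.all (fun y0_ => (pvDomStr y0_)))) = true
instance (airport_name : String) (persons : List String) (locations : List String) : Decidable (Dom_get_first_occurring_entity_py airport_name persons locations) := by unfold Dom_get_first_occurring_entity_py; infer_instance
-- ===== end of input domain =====

-- B replaces A's tagged-tuple list plus stable sort by a single min-scan keeping the best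
-- (position, entity) pair (objective: simpler; same searches, no sort).

-- ===== PORT A =====
def get_first_occurring_entity_py (airport_name : String) (persons : List String) (locations : List String) : Option String :=
  if persons = [] ∧ locations = [] then none
  else
    let clean_name := PySem.Str.lower airport_name
    let entity_positions : List (Int × String × String) :=
      persons.foldl (fun acc person =>
        let pos := PySem.Str.find clean_name (PySem.Str.lower person)
        if pos ≠ -1 then acc ++ [(pos, person, "person")] else acc) []
    let entity_positions :=
      locations.foldl (fun acc location =>
        let pos := PySem.Str.find clean_name (PySem.Str.lower location)
        if pos ≠ -1 then acc ++ [(pos, location, "location")] else acc) entity_positions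
    if entity_positions = [] then none
    else
      -- entity_positions.sort(key=lambda x: x[0]) ; return entity_positions[0][1]
      let sortedEp := PySem.List.sorted entity_positions (fun x => x.1)
      match PySem.List.pyGet? sortedEp 0 with
      | some t => some t.2.1
      | none => none

-- ===== PORT B =====
def get_first_occurring_entity_py_alt (airport_name : String) (persons : List String) (locations : List String) : Option String :=
  let clean_name := PySem.Str.lower airport_name
  let best := (persons ++ locations).foldl (fun best entity =>
    let pos := PySem.Str.find clean_name (PySem.Str.lower entity)
    if pos = -1 then best
    else match best with
      | none => some (pos, entity)
      | some b => if pos < b.1 then some (pos, entity) else some b) none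
  match best with
  | none => none
  | some b => some b.2

-- ===== PRECONDITION & SPEC =====
def Spec_get_first_occurring_entity_py (airport_name : String) (persons : List String) (locations : List String) (out : Option String) : Prop := out = get_first_occurring_entity_py_alt airport_name persons locations
instance (airport_name : String) (persons : List String) (locations : List String) (out : Option String) : Decidable (Spec_get_first_occurring_entity_py airport_name persons locations out) := by unfold Spec_get_first_occurring_entity_py; infer_instance

-- ===== CLAIM (what is proved, stated in full; the proofs are below) =====
def Claim_equal_get_first_occurring_entity_py : Prop := ∀ (airport_name : String) (persons : List String) (locations : List String), Dom_get_first_occurring_entity_py airport_name persons locations → Spec_get_first_occurring_entity_py airport_name persons locations (get_first_occurring_entity_py airport_name persons locations)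

-- ===== LEMMAS AND PROOFS =====

-- the "min of the prefix so far" step (strict <: earlier elements win ties)
def pvMinE (m : Option (Int × String × String)) (e : Int × String × String) : Option (Int × String × String) :=
  match m with
  | none => some e
  | some y => if e.1 < y.1 then some e else some y

-- A's fold step (building entity_positions with tag `tag`)
def pvStepA (cn tag : String) (acc : List (Int × String × String)) (x : String) : List (Int × String × String) :=
  let pos := PySem.Str.find cn (PySem.Str.lower x)
  if pos ≠ -1 then acc ++ [(pos, x, tag)] else acc

-- B's fold step
def pvStepB (cn : String) (best : Option (Int × String)) (entity : String) : Option (Int × String) :=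
  let pos := PySem.Str.find cn (PySem.Str.lower entity)
  if pos = -1 then best
  else match best with
    | none => some (pos, entity)
    | some b => if pos < b.1 then some (pos, entity) else some b

def pvProj (m : Option (Int × String × String)) : Option (Int × String) :=
  m.map (fun e => (e.1, e.2.1))

lemma pv_head?_insertBy (e : Int × String × String) (acc : List (Int × String × String)) :
    (PySem.List.insertBy (fun a b => decide (a.1 < b.1)) e acc).head? = pvMinE acc.head? e := by
  cases acc with
  | nil => rfl
  | cons y ys =>
    simp only [PySem.List.insertBy, pvMinE]
    split_ifs with h <;> simp_all

lemma pv_head?_foldl_insertBy (l acc : List (Int × String × String)) :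
    (l.foldl (fun acc x => PySem.List.insertBy (fun a b => decide (a.1 < b.1)) x acc) acc).head?
      = l.foldl pvMinE acc.head? := by
  induction l generalizing acc with
  | nil => rfl
  | cons x xs ih =>
    simp only [List.foldl_cons, ih, pv_head?_insertBy]

lemma pv_proj_minE (m : Option (Int × String × String)) (e : Int × String × String) :
    pvProj (pvMinE m e) =
      match pvProj m with
      | none => some (e.1, e.2.1)
      | some b => if e.1 < b.1 then some (e.1, e.2.1) else some b := by
  cases m with
  | none => rfl
  | some y => simp only [pvMinE, pvProj, Option.map_some]; split_ifs <;> rfl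

lemma pv_main (cn tag : String) (xs : List String) (acc : List (Int × String × String))
    (b : Option (Int × String × String)) :
    xs.foldl (pvStepB cn) (pvProj (acc.foldl pvMinE b))
      = pvProj ((xs.foldl (pvStepA cn tag) acc).foldl pvMinE b) := by
  induction xs generalizing acc with
  | nil => rfl
  | cons x xs ih =>
    simp only [List.foldl_cons]
    by_cases h : PySem.Chars.find cn.toList (PySem.Chars.lower x.toList) = -1
    · have hA : pvStepA cn tag acc x = acc := by simp [pvStepA, h]
      have hB : pvStepB cn (pvProj (acc.foldl pvMinE b)) x = pvProj (acc.foldl pvMinE b) := by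
        simp [pvStepB, h]
      rw [hA, hB, ih]
    · have hA : pvStepA cn tag acc x = acc ++ [(PySem.Str.find cn (PySem.Str.lower x), x, tag)] := by
        simp [pvStepA, h]
      have hfold : ((acc ++ [(PySem.Str.find cn (PySem.Str.lower x), x, tag)]).foldl pvMinE b)
          = pvMinE (acc.foldl pvMinE b) (PySem.Str.find cn (PySem.Str.lower x), x, tag) := by
        rw [List.foldl_append]; rfl
      have hB : pvStepB cn (pvProj (acc.foldl pvMinE b)) x
          = pvProj (pvMinE (acc.foldl pvMinE b) (PySem.Str.find cn (PySem.Str.lower x), x, tag)) := by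
        rw [pv_proj_minE]
        simp only [pvStepB, PySem.Str.find_eq, PySem.Str.toList_lower, if_neg h]
      rw [hB, ← hfold, ← hA, ih]

lemma pv_pyGet_zero (xs : List (Int × String × String)) :
    PySem.List.pyGet? xs 0 = xs.head? := by
  cases xs <;> simp [PySem.List.pyGet?, PySem.List.pyIdx?]

-- ===== VERDICT (by name: the statement is the Claim_ definition above) =====
theorem get_first_occurring_entity_py_spec : Claim_equal_get_first_occurring_entity_py := by
  intro airport_name persons locations _
  unfold Spec_get_first_occurring_entity_py
  unfold get_first_occurring_entity_py get_first_occurring_entity_py_alt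
  set cn := PySem.Str.lower airport_name with hcn
  -- B's value, in closed form
  have hBsteps : ∀ (xs : List String) (m : Option (Int × String)),
      xs.foldl (fun best entity =>
        let pos := PySem.Str.find cn (PySem.Str.lower entity)
        if pos = -1 then best
        else match best with
          | none => some (pos, entity)
          | some b => if pos < b.1 then some (pos, entity) else some b) m
        = xs.foldl (pvStepB cn) m := by
    intro xs m; rfl
  have hAsteps : ∀ (tag : String) (xs : List String) (acc : List (Int × String × String)),
      xs.foldl (fun acc x =>
        let pos := PySem.Str.find cn (PySem.Str.lower x)
        if pos ≠ -1 then acc ++ [(pos, x, tag)] else acc) acc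
        = xs.foldl (pvStepA cn tag) acc := by
    intro tag xs acc; rfl
  simp only [hBsteps, hAsteps, List.foldl_append]
  -- rewrite B through the two folds
  have h1 := pv_main cn "person" persons [] none
  have h2 := pv_main cn "location" locations (persons.foldl (pvStepA cn "person") []) none
  have hB : locations.foldl (pvStepB cn) (persons.foldl (pvStepB cn) none)
      = pvProj ((locations.foldl (pvStepA cn "location")
          (persons.foldl (pvStepA cn "person") [])).foldl pvMinE none) := by
    have h0 : (persons.foldl (pvStepB cn) none)
        = pvProj ((persons.foldl (pvStepA cn "person") []).foldl pvMinE none) := h1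
    rw [h0]
    have := pv_main cn "location" locations (persons.foldl (pvStepA cn "person") []) none
    simpa using this
  rw [hB]
  set ep := (locations.foldl (pvStepA cn "location") (persons.foldl (pvStepA cn "person") []))
    with hep
  -- A's value: sorted head = min fold
  have hsorted : (PySem.List.sorted ep (fun x => x.1)).head? = ep.foldl pvMinE none := by
    rw [PySem.List.sorted_eq_foldl_insertBy]
    exact pv_head?_foldl_insertBy ep []
  by_cases hempty : persons = [] ∧ locations = []
  · obtain ⟨hp, hl⟩ := hempty
    subst hp; subst hl
    rfl
  · rw [if_neg hempty]
    by_cases hep0 : ep = []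
    · rw [if_pos hep0, hep0]
      rfl
    · rw [if_neg hep0, pv_pyGet_zero, hsorted]
      cases hm : ep.foldl pvMinE none with
      | none => rfl
      | some t => rfl
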